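-- pv_equiv track=rewrite | github.com/Partha103/Python_Codes | casestudy12.py | are_binary_anagrams
-- ===== SOURCE A (Python) =====
-- def are_binary_anagrams(a, b):
--     binary_a = bin(a)[2:]  # convert a to binary string
--     binary_b = bin(b)[2:]  # convert b to binary string
--     if len(binary_a) != len(binary_b):
--         return False  # if lengths are not equal, they cannot be anagrams
--     freq = {}  # create empty dictionary to store frequencies of 0's and 1's
--     for bit in binary_a:
--         freq[bit] = freq.get(bit, 0) + 1  # increment frequency count for bit
--     for bit in binary_b:
--         if bit not in freq:
--             return False  # if bit not in freq, they cannot be anagrams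
--         freq[bit] -= 1  # decrement frequency count for bit
--         if freq[bit] == 0:
--             del freq[bit]  # remove key if frequency count is 0
--     return len(freq) == 0  # return True if all frequency counts are 0
-- ===== SOURCE B (Python) =====
-- def are_binary_anagrams(a, b):
--     # Sorting-based anagram check of the binary representations (same return value as the
--     # frequency-dict version; different lengths give different sorted lists automatically).
--     return sorted(bin(a)[2:]) == sorted(bin(b)[2:])
-- ===== Notes on version B (the rewrite author's own statement) =====
-- stated objective: simpler
-- what changed: Replaces the length guard plus build-then-decrement frequency-dict scan with a one-line sorting-based comparison of the two binary strings (sorted(s_a) == sorted(s_b)).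
import Mathlib
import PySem

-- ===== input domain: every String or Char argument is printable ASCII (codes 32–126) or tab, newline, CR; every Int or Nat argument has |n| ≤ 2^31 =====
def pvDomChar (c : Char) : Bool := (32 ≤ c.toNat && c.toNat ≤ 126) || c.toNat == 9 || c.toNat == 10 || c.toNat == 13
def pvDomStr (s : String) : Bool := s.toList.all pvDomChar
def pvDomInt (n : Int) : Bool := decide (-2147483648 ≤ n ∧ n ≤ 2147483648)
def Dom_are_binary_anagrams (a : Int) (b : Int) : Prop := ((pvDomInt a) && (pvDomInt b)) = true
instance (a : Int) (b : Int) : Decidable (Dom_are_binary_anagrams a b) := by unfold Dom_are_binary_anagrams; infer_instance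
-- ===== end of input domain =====

-- B replaces A's length guard plus build-then-decrement frequency dict with a one-line
-- sorted-characters comparison of the two binary strings (simpler, same return value).

-- ===== PORT A =====
-- bin(n)[2:] as a list of characters (shared: both Pythons compute exactly this)
def pvBinTail (n : Int) : List Char :=
  PySem.List.slice (PySem.Int.toBinChars0b n) (some 2) none

-- the 'for bit in binary_b' loop of A (early return False; afterwards 'len(freq) == 0')
def pvAnagramLoop (freq : PySem.Dict Char Int) : List Char → Bool
  | [] => freq.size == 0
  | bit :: rest =>
    if freq.contains bit then
      -- freq[bit] -= 1; if freq[bit] == 0: del freq[bit]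
      let freq1 := freq.modify bit 0 (· - 1)
      let freq2 := if freq1.getD bit 0 == 0 then freq1.erase bit else freq1
      pvAnagramLoop freq2 rest
    else false

def are_binary_anagrams (a : Int) (b : Int) : Bool :=
  let binary_a := pvBinTail a
  let binary_b := pvBinTail b
  if binary_a.length ≠ binary_b.length then false
  else
    -- freq = {}; for bit in binary_a: freq[bit] = freq.get(bit, 0) + 1
    let freq := binary_a.foldl (fun d c => d.insert c (d.getD c 0 + 1)) PySem.Dict.empty
    pvAnagramLoop freq binary_b

-- ===== PORT B =====
def are_binary_anagrams_alt (a : Int) (b : Int) : Bool :=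
  decide ((PySem.List.sorted (pvBinTail a) (fun x => x) false)
        = (PySem.List.sorted (pvBinTail b) (fun x => x) false))

-- ===== PRECONDITION & SPEC =====
def Spec_are_binary_anagrams (a : Int) (b : Int) (out : Bool) : Prop := out = are_binary_anagrams_alt a b
instance (a : Int) (b : Int) (out : Bool) : Decidable (Spec_are_binary_anagrams a b out) := by unfold Spec_are_binary_anagrams; infer_instance

-- ===== CLAIM (what is proved, stated in full; the proofs are below) =====
def Claim_equal_are_binary_anagrams : Prop := ∀ (a : Int) (b : Int), Dom_are_binary_anagrams a b → Spec_are_binary_anagrams a b (are_binary_anagrams a b)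

-- ===== LEMMAS AND PROOFS =====

-- erase: lookup lemmas (not in the PySem lemma list, proved from the filter definition)
theorem pv_get?_erase {ν : Type} (d : PySem.Dict Char ν) (k k' : Char) :
    (d.erase k).get? k' = if k' = k then none else d.get? k' := by
  obtain ⟨items⟩ := d
  simp only [PySem.Dict.erase, PySem.Dict.get?]
  induction items with
  | nil => simp
  | cons p t ih =>
    obtain ⟨q, v⟩ := p
    by_cases hqk : q = k <;> by_cases hqk' : q = k' <;>
      simp_all [beq_iff_eq]

theorem pv_keys_erase_sublist {ν : Type} (d : PySem.Dict Char ν) (k : Char) :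
    (d.erase k).keys.Sublist d.keys := by
  simp only [PySem.Dict.erase, PySem.Dict.keys]
  exact List.Sublist.map _ List.filter_sublist

-- the dict invariant maintained by A's second loop: distinct keys, and a key is present
-- exactly when its stored count is positive
def pvInv (d : PySem.Dict Char Int) : Prop :=
  d.keys.Nodup ∧ ∀ c : Char, d.contains c = true ↔ 0 < d.getD c 0

theorem pv_size_zero_iff (d : PySem.Dict Char Int) (hI : pvInv d) :
    (d.size == 0) = true ↔ ∀ c : Char, d.getD c 0 = 0 := by
  obtain ⟨items⟩ := d
  constructor
  · intro h c
    have : items = [] := by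
      simpa [PySem.Dict.size, List.length_eq_zero_iff] using h
    simp [PySem.Dict.getD, PySem.Dict.get?, this]
  · intro h
    cases hit : items with
    | nil => simp [PySem.Dict.size]
    | cons p t =>
      exfalso
      have hc : (PySem.Dict.mk items).contains p.1 = true := by
        simp [PySem.Dict.contains, hit]
      have := (hI.2 p.1).mp hc
      rw [h p.1] at this
      exact lt_irrefl 0 this

theorem pv_loop_spec (ys : List Char) (d : PySem.Dict Char Int) (hI : pvInv d) :
    pvAnagramLoop d ys = true ↔ ∀ c : Char, d.getD c 0 = ys.count c := by
  induction ys generalizing d with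
  | nil =>
    simpa [pvAnagramLoop] using pv_size_zero_iff d hI
  | cons bit rest ih =>
    by_cases hc : d.contains bit = true
    · have hpos : 0 < d.getD bit 0 := (hI.2 bit).mp hc
      set d1 := d.modify bit 0 (· - 1) with hd1
      have hgd1 : ∀ c : Char, d1.getD c 0 = if c = bit then d.getD bit 0 - 1 else d.getD c 0 := by
        intro c; simp [hd1, PySem.Dict.getD_modify]
      set d2 := if d1.getD bit 0 == 0 then d1.erase bit else d1 with hd2
      have hloop : pvAnagramLoop d (bit :: rest) = pvAnagramLoop d2 rest := by
        conv_lhs => rw [pvAnagramLoop]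
        rw [if_pos hc]
      -- lookups in d2
      have hgd2 : ∀ c : Char, d2.getD c 0 = if c = bit then d.getD bit 0 - 1 else d.getD c 0 := by
        intro c
        by_cases hzero : (d1.getD bit 0 == 0) = true
        · rw [hd2, if_pos hzero]
          by_cases hcb : c = bit
          · subst hcb
            have h2 := hgd1 c
            rw [if_pos rfl] at h2
            simp only [beq_iff_eq] at hzero
            rw [h2] at hzero
            rw [PySem.Dict.getD_eq_get?_getD, pv_get?_erase, if_pos rfl, if_pos rfl]
            simp [hzero]
          · rw [PySem.Dict.getD_eq_get?_getD, pv_get?_erase, if_neg hcb,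
              ← PySem.Dict.getD_eq_get?_getD, hgd1 c, if_neg hcb]
        · rw [hd2, if_neg hzero]
          exact hgd1 c
      have hI2 : pvInv d2 := by
        have hnd1 : d1.keys.Nodup := by
          rw [hd1, PySem.Dict.keys_modify]
          exact PySem.Dict.nodup_keys_insert _ _ _ hI.1
        constructor
        · by_cases hzero : (d1.getD bit 0 == 0) = true
          · rw [hd2, if_pos hzero]
            exact (pv_keys_erase_sublist d1 bit).nodup hnd1
          · rw [hd2, if_neg hzero]
            exact hnd1
        · intro c
          rw [hgd2 c]
          by_cases hcb : c = bit
          · subst hcb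
            rw [if_pos rfl]
            by_cases hzero : (d1.getD c 0 == 0) = true
            · have hcon : d2.contains c = false := by
                have hg : d2.get? c = none := by
                  rw [hd2, if_pos hzero, pv_get?_erase, if_pos rfl]
                exact (PySem.Dict.get?_eq_none_iff_contains _ _).mp hg
              have h2 := hgd1 c
              rw [if_pos rfl] at h2
              simp only [beq_iff_eq] at hzero
              rw [h2] at hzero
              rw [hcon, hzero]
              simp
            · have h2 := hgd1 c
              rw [if_pos rfl] at h2
              have hne : d.getD c 0 - 1 ≠ 0 := by
                intro h
                rw [h2, h] at hzero
                simp at hzero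
              have hcon : d2.contains c = true := by
                rw [hd2, if_neg hzero, hd1, PySem.Dict.contains_modify]
                simp
              rw [hcon]
              simp only [true_iff]
              omega
          · rw [if_neg hcb]
            have hcon : d2.contains c = d.contains c := by
              have h1 : d1.contains c = d.contains c := by
                rw [hd1, PySem.Dict.contains_modify]
                simp [hcb]
              by_cases hzero : (d1.getD bit 0 == 0) = true
              · rw [PySem.Dict.contains_eq_isSome_get?,
                  show d2.get? c = d1.get? c by rw [hd2, if_pos hzero, pv_get?_erase, if_neg hcb],
                  ← PySem.Dict.contains_eq_isSome_get?]
                exact h1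
              · rw [hd2, if_neg hzero]
                exact h1
            rw [hcon]
            exact hI.2 c
      rw [hloop, ih d2 hI2]
      constructor
      · intro h c
        have hthis := h c
        rw [hgd2 c] at hthis
        by_cases hcb : c = bit
        · subst hcb
          rw [if_pos rfl] at hthis
          rw [List.count_cons_self]
          push_cast
          omega
        · rw [if_neg hcb] at hthis
          rw [hthis, List.count_cons_of_ne (Ne.symm hcb)]
      · intro h c
        rw [hgd2 c]
        have hthis := h c
        by_cases hcb : c = bit
        · subst hcb
          rw [List.count_cons_self] at hthis
          rw [if_pos rfl]
          push_cast at hthis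
          omega
        · rw [if_neg hcb, hthis, List.count_cons_of_ne (Ne.symm hcb)]
    · have hcf : d.contains bit = false := by simpa using hc
      have hfalse : pvAnagramLoop d (bit :: rest) = false := by
        conv_lhs => rw [pvAnagramLoop]
        rw [hcf]
        simp
      rw [hfalse]
      simp only [Bool.false_eq_true, false_iff, not_forall]
      refine ⟨bit, ?_⟩
      rw [PySem.Dict.getD_of_not_contains d 0 hcf, List.count_cons_self]
      push_cast
      omega

-- ===== VERDICT (by name: the statement is the Claim_ definition above) =====
theorem pv_counter_inv (xs : List Char) : pvInv (PySem.Dict.counter xs) := by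
  refine ⟨PySem.Dict.nodup_keys_counter xs, fun c => ?_⟩
  rw [PySem.Dict.contains_counter, PySem.Dict.getD_counter]
  constructor
  · intro h
    have hm : c ∈ xs := by simpa using h
    exact_mod_cast List.count_pos_iff.mpr hm
  · intro h
    have : 0 < xs.count c := by exact_mod_cast h
    simpa using List.count_pos_iff.mp this

theorem pv_A_true_iff (a b : Int) :
    are_binary_anagrams a b = true ↔ (pvBinTail a).Perm (pvBinTail b) := by
  unfold are_binary_anagrams
  by_cases hlen : (pvBinTail a).length ≠ (pvBinTail b).length
  · rw [if_pos hlen]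
    simp only [Bool.false_eq_true, false_iff]
    intro hp
    exact hlen hp.length_eq
  · rw [if_neg hlen]
    rw [PySem.Dict.foldl_insert_getD_add_one_eq_counter]
    rw [pv_loop_spec _ _ (pv_counter_inv (pvBinTail a))]
    constructor
    · intro h
      refine List.perm_iff_count.mpr fun c => ?_
      have := h c
      rw [PySem.Dict.getD_counter] at this
      exact_mod_cast this
    · intro hp c
      rw [PySem.Dict.getD_counter]
      exact_mod_cast List.perm_iff_count.mp hp c

-- ===== VERDICT (by name: the statement is the Claim_ definition above) =====
theorem are_binary_anagrams_spec : Claim_equal_are_binary_anagrams := by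
  intro a b _
  unfold Spec_are_binary_anagrams
  have hB : are_binary_anagrams_alt a b = true ↔ (pvBinTail a).Perm (pvBinTail b) := by
    unfold are_binary_anagrams_alt
    rw [decide_eq_true_iff]
    exact PySem.List.sorted_id_eq_sorted_id_iff_perm _ _
  cases hA : are_binary_anagrams a b with
  | true => exact (hB.mpr ((pv_A_true_iff a b).mp hA)).symm
  | false =>
    cases hB2 : are_binary_anagrams_alt a b with
    | false => rfl
    | true =>
      have hT := (pv_A_true_iff a b).mpr (hB.mp hB2)
      rw [hA] at hT
      exact absurd hT Bool.false_ne_true
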